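-- pv_equiv track=rewrite | github.com/kevinros/toucheRetrievalVisualization | processor.py | createPassages
-- ===== SOURCE A (Python) =====
-- def createPassages(list_of_sentences, max_passage_words=200):
--     """
--     Segments the list of sentences into roughly equal_size passages
--
--     :param list_of_sentences: list of strings
--     :type list_of_sentences: list of strings
--
--     :param max_passage_words: upper approximate limit on number of words for each passage
--                               limited due to BERT encoder
--                               default = 200
--     :type max_passage_words: int
--
--     :rtype: list of strings
--     :returns: list where each entry is a passages
--     """
--
--     passages = []
--     current_passage = []
--     for sentence in list_of_sentences:
--         current_passage.append(sentence)
--         if len(" ".join(current_passage).split()) > max_passage_words: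
--             passages.append(" ".join(current_passage))
--             current_passage = []
--     # get any remaining sentences
--     if current_passage:
--         passages.append(" ".join(current_passage))
--     return passages
-- ===== SOURCE B (Python) =====
-- def createPassages(list_of_sentences, max_passage_words=200):
--     # Stage 1: per-sentence word counts; Stage 2: compute cut indices;
--     # Stage 3: materialize passages by joining slices between consecutive cuts.
--     counts = [len(s.split()) for s in list_of_sentences]
--     cuts = [0]
--     running = 0
--     i = 0
--     for c in counts:
--         i += 1
--         running += c
--         if running > max_passage_words:
--             cuts.append(i)
--             running = 0
--     if cuts[-1] != len(list_of_sentences):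
--         cuts.append(len(list_of_sentences))
--     return [" ".join(list_of_sentences[a:b]) for a, b in zip(cuts, cuts[1:])]
-- ===== Notes on version B (the rewrite author's own statement) =====
-- stated objective: faster
-- what changed: B is a staged algorithm: it first maps each sentence to its word count, then computes the list of cut indices in one scan over the counts, and finally materializes each passage by joining a slice between consecutive cuts — there is no passage accumulator and no repeated join-and-resplit of the growing buffer as in A.
import Mathlib
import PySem

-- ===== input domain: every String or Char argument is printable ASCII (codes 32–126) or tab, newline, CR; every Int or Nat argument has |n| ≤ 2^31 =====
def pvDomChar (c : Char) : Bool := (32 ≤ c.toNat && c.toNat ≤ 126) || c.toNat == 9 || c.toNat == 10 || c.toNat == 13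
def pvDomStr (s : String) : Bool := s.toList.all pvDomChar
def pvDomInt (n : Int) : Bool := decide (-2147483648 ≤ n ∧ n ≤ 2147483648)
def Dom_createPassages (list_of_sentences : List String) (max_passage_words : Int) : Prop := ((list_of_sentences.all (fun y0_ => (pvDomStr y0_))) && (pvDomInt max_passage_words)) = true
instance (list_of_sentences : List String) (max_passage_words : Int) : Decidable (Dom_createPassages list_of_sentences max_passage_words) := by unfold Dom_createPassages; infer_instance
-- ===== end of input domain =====

-- B replaces A's accumulate-and-rejoin loop by three stages: per-sentence word counts,
-- one scan computing cut indices, then passages as joined slices between consecutive cuts (objective: faster).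

-- ===== PORT A =====
-- A: append the sentence to the current passage, re-join and re-split it to count words, flush when over the limit.
def stepA (m : Int) (st : List String × List String) (sentence : String) : List String × List String :=
  let cur := st.2 ++ [sentence]
  if ((PySem.Str.split₀ (PySem.Str.join " " cur)).length : Int) > m then
    (st.1 ++ [PySem.Str.join " " cur], [])
  else
    (st.1, cur)

def createPassages (list_of_sentences : List String) (max_passage_words : Int) : List String :=
  let st := list_of_sentences.foldl (stepA max_passage_words) ([], [])
  if st.2 ≠ [] then st.1 ++ [PySem.Str.join " " st.2] else st.1

-- ===== PORT B =====
-- B stage 2 step: state (cuts, running, i); i += 1; running += c; flush a cut when running > m.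
def stepB (m : Int) (st : List Int × Int × Int) (c : Int) : List Int × Int × Int :=
  let i := st.2.2 + 1
  let r := st.2.1 + c
  if r > m then (st.1 ++ [i], 0, i) else (st.1, r, i)

def createPassages_alt (list_of_sentences : List String) (max_passage_words : Int) : List String :=
  let counts := list_of_sentences.map (fun s => ((PySem.Str.split₀ s).length : Int))
  let st := counts.foldl (stepB max_passage_words) ([0], 0, 0)
  let cuts := if PySem.List.pyGetD st.1 (-1) 0 ≠ PySem.List.len list_of_sentences then
                st.1 ++ [PySem.List.len list_of_sentences]
              else st.1
  (cuts.zip (PySem.List.slice cuts (some 1) none)).map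
    (fun ab => PySem.Str.join " " (PySem.List.slice list_of_sentences (some ab.1) (some ab.2)))

-- ===== PRECONDITION & SPEC =====
def Spec_createPassages (list_of_sentences : List String) (max_passage_words : Int) (out : List String) : Prop := out = createPassages_alt list_of_sentences max_passage_words
instance (list_of_sentences : List String) (max_passage_words : Int) (out : List String) : Decidable (Spec_createPassages list_of_sentences max_passage_words out) := by unfold Spec_createPassages; infer_instance

-- ===== CLAIM (what is proved, stated in full; the proofs are below) =====
def Claim_equal_createPassages : Prop := ∀ (list_of_sentences : List String) (max_passage_words : Int), Dom_createPassages list_of_sentences max_passage_words → Spec_createPassages list_of_sentences max_passage_words (createPassages list_of_sentences max_passage_words)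

-- ===== LEMMAS AND PROOFS =====

-- split₀.go is accumulator-linear
theorem go_acc (s : List Char) (cur : List Char) (acc : List (List Char)) :
    PySem.Chars.split₀.go s cur acc = acc.reverse ++ PySem.Chars.split₀.go s cur [] := by
  induction s generalizing cur acc with
  | nil => simp [PySem.Chars.split₀.go]; split <;> simp
  | cons c rest ih =>
    simp only [PySem.Chars.split₀.go]
    split
    · split
      · exact ih _ _
      · rw [ih [] (_ :: acc), ih [] [_]]; simp
    · exact ih _ _

-- a single space splits the work of split₀.go in two
theorem go_split (b : List Char) : ∀ (a cur : List Char),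
    PySem.Chars.split₀.go (a ++ ' ' :: b) cur [] =
      PySem.Chars.split₀.go a cur [] ++ PySem.Chars.split₀.go b [] [] := by
  intro a
  induction a with
  | nil =>
    intro cur
    have hsp : PySem.Chars.isspace ' ' = true := by decide
    by_cases h : cur.isEmpty = true
    · simp [PySem.Chars.split₀.go, hsp, h]
    · simp only [List.nil_append, PySem.Chars.split₀.go, hsp, h, if_true]
      rw [go_acc b [] [cur.reverse]]
      simp
  | cons c rest ih =>
    intro cur
    by_cases hc : PySem.Chars.isspace c = true
    · by_cases h : cur.isEmpty = true
      · simp only [List.cons_append, PySem.Chars.split₀.go, hc, h, if_true]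
        exact ih []
      · simp only [List.cons_append, PySem.Chars.split₀.go, hc, h, if_true]
        rw [go_acc (rest ++ ' ' :: b) [] [cur.reverse], go_acc rest [] [cur.reverse], ih []]
        simp
    · simp only [List.cons_append, PySem.Chars.split₀.go, hc]
      exact ih _

theorem split₀_append_space (a b : List Char) :
    PySem.Chars.split₀ (a ++ ' ' :: b) = PySem.Chars.split₀ a ++ PySem.Chars.split₀ b := by
  simp only [PySem.Chars.split₀]
  exact go_split b a []

-- the words of a " "-join are the words of the parts, in order
theorem split₀_join (parts : List (List Char)) :
    PySem.Chars.split₀ (PySem.Chars.join [' '] parts) = parts.flatMap PySem.Chars.split₀ := by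
  induction parts with
  | nil => simp [PySem.Chars.join, List.intercalate, PySem.Chars.split₀, PySem.Chars.split₀.go]
  | cons p ps ih =>
    cases ps with
    | nil => simp [PySem.Chars.join, List.intercalate]
    | cons q qs =>
      have h : PySem.Chars.join [' '] (p :: q :: qs) = p ++ ' ' :: PySem.Chars.join [' '] (q :: qs) := by
        simp [PySem.Chars.join, List.intercalate]
      rw [h, split₀_append_space, ih]
      simp

-- running word count of a list of sentences
def wsum (cur : List String) : Int :=
  ((cur.map (fun s => (PySem.Str.split₀ s).length)).sum : Nat)

theorem wsum_nil : wsum [] = 0 := rfl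

theorem wsum_append_singleton (cur : List String) (s : String) :
    wsum (cur ++ [s]) = wsum cur + ((PySem.Str.split₀ s).length : Int) := by
  simp [wsum]

-- A's re-join-and-re-split word count equals the running sum
theorem count_join (cur : List String) :
    ((PySem.Str.split₀ (PySem.Str.join " " cur)).length : Int) = wsum cur := by
  have h : PySem.Str.split₀ (PySem.Str.join " " cur)
      = List.map String.ofList ((cur.map String.toList).flatMap PySem.Chars.split₀) := by
    simp only [PySem.Str.split₀, PySem.Str.join]
    rw [show (" " : String).toList = [' '] from rfl]
    simp [split₀_join]
  rw [h]
  simp [wsum, PySem.Str.split₀, Function.comp_def]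

-- the segment of xs between positions j and k
def seg (xs : List String) (j k : Nat) : List String := (xs.drop j).take (k - j)

-- B's passage materialization stage, as a function of the cut list
def passOf (xs : List String) (cuts : List Int) : List String :=
  (cuts.zip cuts.tail).map
    (fun ab => PySem.Str.join " " (PySem.List.slice xs (some ab.1) (some ab.2)))

theorem seg_succ (xs : List String) (j k : Nat) (hjk : j ≤ k) (hk : k < xs.length) :
    seg xs j (k + 1) = seg xs j k ++ [xs[k]] := by
  simp only [seg]
  have h1 : k + 1 - j = (k - j) + 1 := by omega
  rw [h1, List.take_succ]
  have h2 : (xs.drop j)[k - j]? = some xs[k] := by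
    rw [List.getElem?_drop]
    have : j + (k - j) = k := by omega
    rw [this, List.getElem?_eq_getElem hk]
  simp [h2]

theorem zip_tail_concat : ∀ (cs : List Int) (a b : Int),
    ((cs ++ [a, b]).zip (cs ++ [a, b]).tail) = ((cs ++ [a]).zip (cs ++ [a]).tail) ++ [(a, b)] := by
  intro cs
  induction cs with
  | nil => intro a b; rfl
  | cons c cs ih =>
    intro a b
    cases cs with
    | nil => rfl
    | cons c' cs' =>
      have := ih a b
      simp only [List.cons_append, List.tail_cons] at this
      simp only [List.cons_append, List.tail_cons, List.zip_cons_cons, this]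

theorem passOf_concat (xs : List String) (cs : List Int) (a b : Int) :
    passOf xs (cs ++ [a] ++ [b]) =
      passOf xs (cs ++ [a]) ++ [PySem.Str.join " " (PySem.List.slice xs (some a) (some b))] := by
  simp only [passOf, List.append_assoc, List.singleton_append]
  rw [show cs ++ [a, b] = cs ++ [a, b] from rfl, zip_tail_concat]
  simp

theorem passOf_single (xs : List String) (a : Int) : passOf xs [a] = [] := rfl

-- lock-step invariant: A's fold from (passages, current passage) equals B's cut computation and
-- materialization, when the current passage is the segment of xs since the last cut j.
theorem main_inv (xs : List String) (m : Int) : ∀ (ys : List String) (cs : List Int) (j k : Nat),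
    j ≤ k → j ≤ xs.length → ys = xs.drop k →
    (let stA := ys.foldl (stepA m) (passOf xs (cs ++ [(j : Int)]), seg xs j k)
     if stA.2 ≠ [] then stA.1 ++ [PySem.Str.join " " stA.2] else stA.1)
    =
    (let stB := (ys.map (fun s => ((PySem.Str.split₀ s).length : Int))).foldl (stepB m)
        (cs ++ [(j : Int)], wsum (seg xs j k), (k : Int))
     passOf xs (if PySem.List.pyGetD stB.1 (-1) 0 ≠ (xs.length : Int) then
        stB.1 ++ [(xs.length : Int)] else stB.1)) := by
  intro ys
  induction ys with
  | nil =>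
    intro cs j k hjk hjn hdrop
    have hkn : xs.length ≤ k := by
      by_contra h
      push_neg at h
      have := congrArg List.length hdrop
      simp [List.length_drop] at this
      omega
    have hseg : seg xs j k = xs.drop j := by
      simp only [seg]
      apply List.take_of_length_le
      simp [List.length_drop]; omega
    simp only [List.foldl_nil, List.map_nil, hseg]
    rw [PySem.List.pyGetD_neg_one_append_singleton]
    by_cases hje : j = xs.length
    · subst hje
      simp [List.drop_length, passOf]
    · have hjlt : j < xs.length := by omega
      have hne : xs.drop j ≠ [] := by
        simp [List.drop_eq_nil_iff]; omega
      have hcast : ((j : Int) ≠ (xs.length : Int)) := by exact_mod_cast hje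
      simp only [hne, if_true, hcast, ne_eq, not_false_eq_true, if_true]
      have hsl : PySem.List.slice xs (some ((j : Nat) : Int)) (some ((xs.length : Nat) : Int)) = xs.drop j := by
        rw [PySem.List.slice_natCast]
        exact List.take_of_length_le (by simp)
      rw [passOf_concat, hsl]
  | cons s ys ih =>
    intro cs j k hjk hjn hdrop
    have hk : k < xs.length := by
      by_contra h
      push_neg at h
      rw [List.drop_eq_nil_of_le h] at hdrop
      exact List.cons_ne_nil s ys hdrop
    have hxk : xs[k] = s := by
      have := congrArg (·.head?) hdrop
      simp [List.head?_drop, List.getElem?_eq_getElem hk] at this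
      exact this.symm
    have hys : ys = xs.drop (k + 1) := by
      have := congrArg List.tail hdrop
      simpa [List.tail_drop] using this
    simp only [List.foldl_cons, List.map_cons]
    have hcur : seg xs j k ++ [s] = seg xs j (k + 1) := by
      rw [seg_succ xs j k hjk hk, hxk]
    have hws : wsum (seg xs j k) + ((PySem.Str.split₀ s).length : Int) = wsum (seg xs j (k+1)) := by
      rw [← hcur, wsum_append_singleton]
    simp only [stepA, stepB, hcur, count_join]
    by_cases hcond : wsum (seg xs j (k + 1)) > m
    · have hc2 : wsum (seg xs j k) + ((PySem.Str.split₀ s).length : Int) > m := by rw [hws]; exact hcond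
      simp only [hcond, hc2, if_pos]
      have hji : ((k : Int) + 1) = ((k + 1 : Nat) : Int) := by push_cast; ring
      have hjoin : PySem.Str.join " " (seg xs j (k+1)) =
          PySem.Str.join " " (PySem.List.slice xs (some (j : Int)) (some ((k+1 : Nat) : Int))) := by
        rw [PySem.List.slice_natCast]; rfl
      have := ih (cs ++ [(j : Int)]) (k + 1) (k + 1) (le_refl _) (by omega) hys
      rw [passOf_concat] at this
      simp only [seg, Nat.sub_self, List.take_zero, wsum_nil] at this
      rw [hji, hjoin]
      simpa using this
    · have hc2 : ¬ (wsum (seg xs j k) + ((PySem.Str.split₀ s).length : Int) > m) := by rw [hws]; exact hcond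
      simp only [hcond, hc2, if_neg, not_false_eq_true]
      have hji : ((k : Int) + 1) = ((k + 1 : Nat) : Int) := by push_cast; ring
      have := ih cs j (k + 1) (by omega) hjn hys
      rw [hws, hji]
      simpa using this

-- ===== VERDICT (by name: the statement is the Claim_ definition above) =====
theorem createPassages_spec : Claim_equal_createPassages := by
  intro xs m _
  unfold Spec_createPassages createPassages createPassages_alt
  have h := main_inv xs m xs [] 0 0 (le_refl _) (Nat.zero_le _) (by simp)
  simp only [seg, Nat.sub_self, List.take_zero, List.drop_zero, wsum_nil, List.nil_append,
    Nat.cast_zero, passOf_single] at h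
  simpa only [PySem.List.len_eq, PySem.List.slice_from_one, passOf] using h
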